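-- pv_equiv track=rewrite | github.com/mwootten/seizure-forecasting | src/features-old/survival_features.py | convert_survival_form
-- ===== SOURCE A (Python) =====
-- SECONDS_PER_SEGMENT = 5
--
-- def overlaps(s1, s2):
--     """
--     Determines whether segments specified by their endpoints overlap.
--     """
--     (i1, f1) = s1
--     (i2, f2) = s2
--     return ((i1 < f2) and (i2 < f1)) or ((i2 < f1) and (i1 < f2))
--
-- def any_overlap(t_i, t_f, segments):
--     """
--     Extends `overlaps` to check against an artitrary number of segments at once
--     """
--     return any(overlaps((t_i, t_f), seg) for seg in segments)
--
-- def select_segments_part(num_segments, seizure_times):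
--     end_time = num_segments * SECONDS_PER_SEGMENT
--     num_seizures = len(seizure_times)
--     indices = [[] for _ in range(num_seizures + 1)]
--     Y = [[] for _ in range(num_seizures + 1)]
--     for segment_num in range(num_segments):
--         t_i = SECONDS_PER_SEGMENT * (segment_num + 0)
--         t_f = SECONDS_PER_SEGMENT * (segment_num + 1)
--         overlaps_seizure = any_overlap(t_i, t_f, seizure_times)
--         time_before_each_seizure = [
--             # the time from the end of the segment to the seizure start
--             (st_i - t_f, seizure_index)
--             # for all of the seizures
--             for (seizure_index, (st_i, st_f)) in enumerate(seizure_times)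
--             # if the segment ends before the seizure begins
--             if t_f <= st_i
--         ]
--         # If no segments meet the requirements, then just add None
--         # otherwise,
--         (time_before_last_seizure, last_seizure_index) = \
--             min(time_before_each_seizure, default=(None, None))
--         if overlaps_seizure:
--             pass
--         elif time_before_last_seizure is None:
--             # Censorship!
--             indices[num_seizures].append(segment_num)
--             Y[-1].append(end_time - t_f)
--         else:
--             indices[last_seizure_index].append(segment_num)
--             Y[last_seizure_index].append(time_before_last_seizure)
--
--     return (indices, Y)
--
-- def convert_survival_form(lengths, annotations):
--     duration = []
--     observed = []
--     for (length, annotation) in zip(lengths, annotations):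
--         (indices, Y) = select_segments_part(length, annotation)
--         assert len(Y) > 0
--         for seizure in Y[:-1]:
--             duration.append(seizure)
--             observed.append([True] * len(seizure))
--         duration.append(Y[-1])
--         observed.append([False] * len(Y[-1]))
--     return (duration, observed)
-- ===== SOURCE B (Python) =====
-- SECONDS_PER_SEGMENT = 5
--
-- def convert_survival_form(lengths, annotations):
--     duration = []
--     observed = []
--     for (length, seizures) in zip(lengths, annotations):
--         n = len(seizures)
--         end_time = length * SECONDS_PER_SEGMENT
--         # sort seizures once by (start, index); one forward sweep over segments
--         order = sorted(((a, j, b) for (j, (a, b)) in enumerate(seizures)),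
--                        key=lambda t: (t[0], t[1]))
--         dur = [[] for _ in range(n + 1)]
--         k = 0          # pointer: order[:k] are the seizures starting before t_f
--         max_end = None # latest end among seizures starting before t_f
--         for seg in range(length):
--             t_i = SECONDS_PER_SEGMENT * seg
--             t_f = t_i + SECONDS_PER_SEGMENT
--             while k < n and order[k][0] < t_f:
--                 b = order[k][2]
--                 if max_end is None or b > max_end:
--                     max_end = b
--                 k += 1
--             if max_end is not None and t_i < max_end:
--                 continue   # segment overlaps a seizure
--             if k == n:
--                 dur[n].append(end_time - t_f)   # censored
--             else:
--                 dur[order[k][1]].append(order[k][0] - t_f)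
--         duration.extend(dur)
--         observed.extend([True] * len(ys) for ys in dur[:n])
--         observed.append([False] * len(dur[n]))
--     return (duration, observed)
-- ===== Notes on version B (the rewrite author's own statement) =====
-- stated objective: faster
-- what changed: B sorts the seizures once by (start, index) and then makes a single forward sweep over the segments with a monotone pointer and a running max of seizure ends, replacing A's per-segment scan of all seizures (any() overlap test + candidate comprehension + min()).
import Mathlib
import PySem

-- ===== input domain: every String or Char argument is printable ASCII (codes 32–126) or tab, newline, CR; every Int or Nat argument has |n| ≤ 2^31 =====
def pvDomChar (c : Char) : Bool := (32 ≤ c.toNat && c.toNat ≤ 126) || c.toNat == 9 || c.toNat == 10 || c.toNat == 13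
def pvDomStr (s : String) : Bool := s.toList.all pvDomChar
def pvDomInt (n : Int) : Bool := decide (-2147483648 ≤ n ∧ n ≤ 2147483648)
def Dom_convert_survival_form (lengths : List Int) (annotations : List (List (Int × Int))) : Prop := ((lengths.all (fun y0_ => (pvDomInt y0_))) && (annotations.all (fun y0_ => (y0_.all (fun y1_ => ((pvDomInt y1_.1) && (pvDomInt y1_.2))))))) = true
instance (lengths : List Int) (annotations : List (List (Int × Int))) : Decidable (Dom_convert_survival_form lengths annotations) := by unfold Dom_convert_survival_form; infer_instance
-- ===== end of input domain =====

-- B sorts the seizures once by (start, index) and sweeps the segments with a monotone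
-- pointer and a running max of seizure ends, replacing A's per-segment scans; the timing
-- run measured B faster on the large inputs.

-- ===== PORT A =====
def SECONDS_PER_SEGMENT : Int := 5

def overlaps (s1 s2 : Int × Int) : Bool :=
  ((s1.1 < s2.2) && (s2.1 < s1.2)) || ((s2.1 < s1.2) && (s1.1 < s2.2))

def any_overlap (t_i t_f : Int) (segments : List (Int × Int)) : Bool :=
  segments.any (fun seg => overlaps (t_i, t_f) seg)

-- `ys[i].append(x)` as a functional update (negative i exact via pySetD/pyGetD)
def appendAtI (ys : List (List Int)) (i : Int) (x : Int) : List (List Int) :=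
  PySem.List.pySetD ys i (PySem.List.pyGetD ys i [] ++ [x])

-- loop body of select_segments_part (outer variables passed as parameters)
def sspStep (seizure_times : List (Int × Int)) (end_time : Int) (num_seizures : Nat)
    (st : List (List Int) × List (List Int)) (segment_num : Int) :
    List (List Int) × List (List Int) :=
  let t_i := SECONDS_PER_SEGMENT * (segment_num + 0)
  let t_f := SECONDS_PER_SEGMENT * (segment_num + 1)
  let overlaps_seizure := any_overlap t_i t_f seizure_times
  let time_before_each_seizure :=
    (PySem.List.enumerate seizure_times).filterMap
      (fun p => if t_f ≤ p.2.1 then some (p.2.1 - t_f, p.1) else none)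
  -- min(..., default=(None, None)): Option result, none = the (None, None) default
  let m := PySem.List.min2? time_before_each_seizure (fun q => q.1) (fun q => q.2)
  if overlaps_seizure then st
  else
    match m with
    | none =>
      (appendAtI st.1 (num_seizures : Int) segment_num,
       appendAtI st.2 (-1) (end_time - t_f))
    | some q =>
      (appendAtI st.1 q.2 segment_num,
       appendAtI st.2 q.2 q.1)

def select_segments_part (num_segments : Int) (seizure_times : List (Int × Int)) :
    List (List Int) × List (List Int) :=
  let end_time := num_segments * SECONDS_PER_SEGMENT
  let num_seizures := seizure_times.length
  let indices := List.replicate (num_seizures + 1) ([] : List Int)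
  let Y := List.replicate (num_seizures + 1) ([] : List Int)
  (PySem.List.pyRange 0 num_segments 1).foldl
    (sspStep seizure_times end_time num_seizures) (indices, Y)

-- body of the per-(length, annotation) loop of convert_survival_form
-- (assert len(Y) > 0 always holds: Y has length len(annotation)+1)
def csfStep (acc : List (List Int) × List (List Bool)) (p : Int × List (Int × Int)) :
    List (List Int) × List (List Bool) :=
  let Y := (select_segments_part p.1 p.2).2
  let acc2 := (PySem.List.slice Y none (some (-1))).foldl
    (fun a seizure =>
      (a.1 ++ [seizure], a.2 ++ [PySem.List.pyRepeat [true] (PySem.List.len seizure)])) acc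
  (acc2.1 ++ [PySem.List.pyGetD Y (-1) []],
   acc2.2 ++ [PySem.List.pyRepeat [false] (PySem.List.len (PySem.List.pyGetD Y (-1) []))])

def convert_survival_form (lengths : List Int) (annotations : List (List (Int × Int))) :
    List (List Int) × List (List Bool) :=
  (lengths.zip annotations).foldl csfStep ([], [])

-- ===== PORT B =====
-- `if max_end is None or b > max_end: max_end = b`
def updME (me : Option Int) (b : Int) : Option Int :=
  match me with
  | none => some b
  | some m => if b > m then some b else me

-- the `while k < n and order[k][0] < t_f:` pointer loop
def sweepB (order : List (Int × Int × Int)) (t_f : Int) (k : Nat) (me : Option Int) :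
    Nat × Option Int :=
  if h : k < order.length then
    if order[k].1 < t_f then sweepB order t_f (k + 1) (updME me order[k].2.2)
    else (k, me)
  else (k, me)
termination_by order.length - k

-- body of B's `for seg in range(length)` loop; state = (dur, k, max_end)
def altSegStep (order : List (Int × Int × Int)) (n : Nat) (end_time : Int)
    (st : List (List Int) × Nat × Option Int) (seg : Int) :
    List (List Int) × Nat × Option Int :=
  let t_i := SECONDS_PER_SEGMENT * seg
  let t_f := t_i + SECONDS_PER_SEGMENT
  let km := sweepB order t_f st.2.1 st.2.2
  if (match km.2 with | some m => decide (t_i < m) | none => false) then (st.1, km)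
  else if km.1 == n then (appendAtI st.1 (n : Int) (end_time - t_f), km)
  else
    let t := PySem.List.pyGetD order (km.1 : Int) (0, 0, 0)  -- order[k], in range here
    (appendAtI st.1 t.2.1 (t.1 - t_f), km)

-- body of B's per-(length, seizures) loop
def altRecStep (acc : List (List Int) × List (List Bool)) (p : Int × List (Int × Int)) :
    List (List Int) × List (List Bool) :=
  let n := p.2.length
  let end_time := p.1 * SECONDS_PER_SEGMENT
  let order := PySem.List.sorted2
    ((PySem.List.enumerate p.2).map (fun q => (q.2.1, q.1, q.2.2)))
    (fun t => t.1) (fun t => t.2.1)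
  let st := (PySem.List.pyRange 0 p.1 1).foldl (altSegStep order n end_time)
    (List.replicate (n + 1) ([] : List Int), 0, none)
  let dur := st.1
  (acc.1 ++ dur,
   acc.2 ++ (PySem.List.slice dur none (some (n : Int))).map
              (fun ys => PySem.List.pyRepeat [true] (PySem.List.len ys))
         ++ [PySem.List.pyRepeat [false] (PySem.List.len (PySem.List.pyGetD dur (n : Int) []))])

def convert_survival_form_alt (lengths : List Int) (annotations : List (List (Int × Int))) :
    List (List Int) × List (List Bool) :=
  (lengths.zip annotations).foldl altRecStep ([], [])

-- ===== PRECONDITION & SPEC =====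
def Spec_convert_survival_form (lengths : List Int) (annotations : List (List (Int × Int))) (out : List (List Int) × List (List Bool)) : Prop := out = convert_survival_form_alt lengths annotations
instance (lengths : List Int) (annotations : List (List (Int × Int))) (out : List (List Int) × List (List Bool)) : Decidable (Spec_convert_survival_form lengths annotations out) := by unfold Spec_convert_survival_form; infer_instance

-- ===== CLAIM (what is proved, stated in full; the proofs are below) =====
def Claim_equal_convert_survival_form : Prop := ∀ (lengths : List Int) (annotations : List (List (Int × Int))), Dom_convert_survival_form lengths annotations → Spec_convert_survival_form lengths annotations (convert_survival_form lengths annotations)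

-- ===== LEMMAS AND PROOFS =====

-- proof-only abbreviations
def lexK (t : Int × Int × Int) : Lex (Int × Int) := toLex (t.1, t.2.1)

def tripsOf (l : List (Int × Int)) : List (Int × Int × Int) :=
  (PySem.List.enumerate l).map (fun q => (q.2.1, q.1, q.2.2))

def Lord (l : List (Int × Int)) : List (Int × Int × Int) :=
  PySem.List.sorted2 (tripsOf l) (fun t => t.1) (fun t => t.2.1)

def pLt (t_f : Int) : Int × Int × Int → Bool := fun x => decide (x.1 < t_f)

def updFold (xs : List (Int × Int × Int)) (init : Option Int) : Option Int :=
  xs.foldl (fun me t => updME me t.2.2) init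

theorem lexK_lt_iff (a b : Int × Int × Int) :
    lexK a < lexK b ↔ a.1 < b.1 ∨ (a.1 = b.1 ∧ a.2.1 < b.2.1) := by
  simpa [lexK] using Prod.Lex.lt_iff (x := toLex (a.1, a.2.1)) (y := toLex (b.1, b.2.1))

theorem lexK_le_iff (a b : Int × Int × Int) :
    lexK a ≤ lexK b ↔ a.1 < b.1 ∨ (a.1 = b.1 ∧ a.2.1 ≤ b.2.1) := by
  simpa [lexK] using Prod.Lex.le_iff (x := toLex (a.1, a.2.1)) (y := toLex (b.1, b.2.1))

theorem Lord_eq_sorted (l : List (Int × Int)) :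
    Lord l = PySem.List.sorted (tripsOf l) lexK := by
  rw [Lord, PySem.List.sorted_eq_foldl_insertBy, PySem.List.sorted2]
  simp only [Bool.false_eq_true, if_false]
  have : (fun (a b : Int × Int × Int) =>
      decide (a.1 < b.1) || (!decide (b.1 < a.1) && decide (a.2.1 < b.2.1)))
      = fun a b => decide (lexK a < lexK b) := by
    funext a b
    rcases lt_trichotomy a.1 b.1 with h | h | h <;>
      simp [lexK_lt_iff, h, not_lt_of_gt]
  rw [this]

theorem Lord_perm (l : List (Int × Int)) : (Lord l).Perm (tripsOf l) := by
  rw [Lord_eq_sorted]; exact PySem.List.sorted_perm _ _ _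

theorem tripsOf_pairwise_j (l : List (Int × Int)) :
    (tripsOf l).Pairwise (fun x y => x.2.1 < y.2.1) := by
  rw [tripsOf, List.pairwise_map]
  exact PySem.List.pairwise_lt_enumerate l 0

theorem Lord_pairwise_lt (l : List (Int × Int)) :
    (Lord l).Pairwise (fun x y => lexK x < lexK y) := by
  have hle : (Lord l).Pairwise (fun x y => lexK x ≤ lexK y) := by
    rw [Lord_eq_sorted]; exact PySem.List.sorted_pairwise _ _
  have hne : (Lord l).Pairwise (fun x y => x.2.1 ≠ y.2.1) := by
    have h1 : (tripsOf l).Pairwise (fun x y => x.2.1 ≠ y.2.1) :=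
      (tripsOf_pairwise_j l).imp (fun h => Int.ne_of_lt h)
    exact ((Lord_perm l).pairwise_iff (fun h => Ne.symm h)).mpr h1
  refine (hle.and hne).imp ?_
  intro a b ⟨h1, h2⟩
  rcases (lexK_le_iff a b).mp h1 with h3 | ⟨h3, h4⟩ <;> rw [lexK_lt_iff] <;> omega

theorem Lord_pairwise_a (l : List (Int × Int)) :
    (Lord l).Pairwise (fun x y => x.1 ≤ y.1) := by
  refine (Lord_pairwise_lt l).imp ?_
  intro a b h
  rcases (lexK_lt_iff a b).mp h with h1 | ⟨h1, _⟩ <;> omega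

theorem mem_tripsOf (l : List (Int × Int)) (x : Int × Int × Int) :
    x ∈ tripsOf l ↔ ∃ (k : Nat) (h : k < l.length), x = (l[k].1, (k : Int), l[k].2) := by
  rw [tripsOf]
  constructor
  · intro hx
    obtain ⟨q, hq, rfl⟩ := List.mem_map.mp hx
    obtain ⟨k, hk, rfl⟩ := (PySem.List.mem_enumerate_iff l 0 q).mp hq
    exact ⟨k, hk, by simp⟩
  · rintro ⟨k, hk, rfl⟩
    exact List.mem_map.mpr ⟨((k : Int), l[k]), (PySem.List.mem_enumerate_iff l 0 _).mpr ⟨k, hk, by simp⟩, rfl⟩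

theorem takeWhile_eq_filter_of_mono {xs : List (Int × Int × Int)}
    (h : xs.Pairwise (fun x y => x.1 ≤ y.1)) (t : Int) :
    xs.takeWhile (pLt t) = xs.filter (pLt t) := by
  induction xs with
  | nil => rfl
  | cons a tl ih =>
    rcases List.pairwise_cons.mp h with ⟨ha, hp⟩
    by_cases hc : a.1 < t
    · simp [pLt, hc, ih hp]
    · simp only [List.takeWhile_cons, List.filter_cons, pLt, hc, decide_false,
        Bool.false_eq_true, if_false]
      symm
      rw [List.filter_eq_nil_iff]
      intro y hy
      have := ha y hy
      simp [pLt]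
      omega

theorem dropWhile_eq_filter_of_mono {xs : List (Int × Int × Int)}
    (h : xs.Pairwise (fun x y => x.1 ≤ y.1)) (t : Int) :
    xs.dropWhile (pLt t) = xs.filter (fun x => !pLt t x) := by
  induction xs with
  | nil => rfl
  | cons a tl ih =>
    rcases List.pairwise_cons.mp h with ⟨ha, hp⟩
    by_cases hc : a.1 < t
    · simp [pLt, hc, ih hp]
    · simp only [List.dropWhile_cons, List.filter_cons, pLt, hc, decide_false, Bool.not_false,
        Bool.false_eq_true, if_false, if_true]
      congr 1
      symm
      rw [List.filter_eq_self]
      intro y hy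
      have := ha y hy
      simp only [Bool.not_eq_true', decide_eq_false_iff_not]
      omega

theorem sweepB_spec (order : List (Int × Int × Int)) (t_f : Int) :
    ∀ (k : Nat) (me : Option Int),
    sweepB order t_f k me =
      (k + ((order.drop k).takeWhile (pLt t_f)).length,
       updFold ((order.drop k).takeWhile (pLt t_f)) me) := by
  intro k me
  fun_induction sweepB order t_f k me with
  | case1 k me h hlt ih =>
    rw [List.drop_eq_getElem_cons h, List.takeWhile_cons]
    simp only [pLt, hlt, decide_true, if_true]
    rw [ih]
    simp [updFold]
    omega
  | case2 k me h hlt =>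
    rw [List.drop_eq_getElem_cons h, List.takeWhile_cons]
    simp [pLt, hlt, updFold]
  | case3 k me h =>
    have : order.drop k = [] := List.drop_eq_nil_of_le (by omega)
    simp [this, updFold]

-- running max over the `b` components, in Option form
theorem updFold_some (xs : List (Int × Int × Int)) (m : Int) :
    updFold xs (some m) = some ((xs.map (fun t => t.2.2)).foldl max m) := by
  induction xs generalizing m with
  | nil => rfl
  | cons a tl ih =>
    simp only [updFold, List.foldl_cons, List.map_cons] at *
    have : updME (some m) a.2.2 = some (max m a.2.2) := by
      simp only [updME]
      by_cases h : a.2.2 > m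
      · rw [if_pos h, max_eq_right (le_of_lt h)]
      · rw [if_neg h, max_eq_left (not_lt.mp h)]
    rw [this, ih]

theorem updFold_none_iff (xs : List (Int × Int × Int)) :
    updFold xs none = none ↔ xs = [] := by
  cases xs with
  | nil => simp [updFold]
  | cons a tl =>
    have h1 : updFold (a :: tl) none = updFold tl (some a.2.2) := rfl
    rw [h1, updFold_some]
    simp

theorem updFold_none_some (xs : List (Int × Int × Int)) (M : Int)
    (h : updFold xs none = some M) :
    (∃ x ∈ xs, x.2.2 = M) ∧ ∀ x ∈ xs, x.2.2 ≤ M := by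
  cases xs with
  | nil => simp [updFold] at h
  | cons a tl =>
    have h' : updFold tl (some a.2.2) = some M := h
    rw [updFold_some] at h'
    have hM : (tl.map (fun t => t.2.2)).foldl max a.2.2 = M := by
      injection h'
    have hub := PySem.List.le_foldl_max (tl.map (fun t => t.2.2)) a.2.2
    have hmem := PySem.List.foldl_max_mem (tl.map (fun t => t.2.2)) a.2.2
    rw [hM] at hub hmem
    constructor
    · rcases hmem with h1 | h1
      · exact ⟨a, by simp, h1.symm⟩
      · obtain ⟨x, hx, hx2⟩ := List.mem_map.mp h1
        exact ⟨x, by simp [hx], hx2⟩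
    · intro x hx
      rcases List.mem_cons.mp hx with rfl | hx
      · exact hub.1
      · exact hub.2 _ (List.mem_map.mpr ⟨x, hx, rfl⟩)

-- B's sweep invariant: prefix of length k consumed, all before threshold T, running max recorded
def InvB (l : List (Int × Int)) (T : Int) (k : Nat) (me : Option Int) : Prop :=
  k ≤ (Lord l).length ∧ (∀ x ∈ (Lord l).take k, x.1 < T) ∧ me = updFold ((Lord l).take k) none

theorem takeWhile_split (l : List (Int × Int)) (t_f : Int) (k : Nat)
    (_hk : k ≤ (Lord l).length) (h : ∀ x ∈ (Lord l).take k, x.1 < t_f) :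
    (Lord l).takeWhile (pLt t_f)
      = (Lord l).take k ++ ((Lord l).drop k).takeWhile (pLt t_f) := by
  conv_lhs => rw [← List.take_append_drop k (Lord l)]
  rw [List.takeWhile_append]
  have hself : ((Lord l).take k).takeWhile (pLt t_f) = (Lord l).take k := by
    rw [List.takeWhile_eq_self_iff]
    intro x hx; simp [pLt]; exact h x hx
  rw [hself]
  simp

theorem sweep_inv (l : List (Int × Int)) (T t_f : Int) (k : Nat) (me : Option Int)
    (hI : InvB l T k me) (hT : T ≤ t_f) :
    sweepB (Lord l) t_f k me
      = (((Lord l).takeWhile (pLt t_f)).length, updFold ((Lord l).takeWhile (pLt t_f)) none)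
    ∧ InvB l t_f (((Lord l).takeWhile (pLt t_f)).length)
        (updFold ((Lord l).takeWhile (pLt t_f)) none) := by
  obtain ⟨hk, hlt, hme⟩ := hI
  have hsplit := takeWhile_split l t_f k hk (fun x hx => lt_of_lt_of_le (hlt x hx) hT)
  have htake : (Lord l).take (((Lord l).takeWhile (pLt t_f)).length) = (Lord l).takeWhile (pLt t_f) :=
    (List.prefix_iff_eq_take.mp (List.takeWhile_prefix _)).symm
  have h2 : updFold ((Lord l).take k ++ ((Lord l).drop k).takeWhile (pLt t_f)) none
      = updFold (((Lord l).drop k).takeWhile (pLt t_f)) me := by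
    rw [updFold, List.foldl_append, hme]; rfl
  constructor
  · rw [sweepB_spec, hsplit, h2]
    congr 1
    simp [List.length_take, Nat.min_eq_left hk]
  · refine ⟨(List.takeWhile_prefix _).length_le, ?_, by rw [htake]⟩
    intro x hx
    rw [htake] at hx
    have := List.mem_takeWhile_imp hx
    simpa [pLt] using this

theorem Lord_length (l : List (Int × Int)) : (Lord l).length = l.length := by
  rw [(Lord_perm l).length_eq, tripsOf, List.length_map, PySem.List.length_enumerate]

theorem mem_Lord_iff (l : List (Int × Int)) (x : Int × Int × Int) :
    x ∈ Lord l ↔ x ∈ tripsOf l := (Lord_perm l).mem_iff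

-- A's overlap test as a plain any (same as in the old proof)
theorem any_overlap_eq (t_i t_f : Int) (l : List (Int × Int)) :
    any_overlap t_i t_f l = l.any (fun sz => t_i < sz.2 && sz.1 < t_f) := by
  unfold any_overlap overlaps
  congr 1
  funext sz
  cases h1 : decide (t_i < sz.2) <;> cases h2 : decide (sz.1 < t_f) <;> simp

theorem mem_W_iff (l : List (Int × Int)) (t_f : Int) (x : Int × Int × Int) :
    x ∈ (Lord l).takeWhile (pLt t_f) ↔ x ∈ Lord l ∧ x.1 < t_f := by
  rw [takeWhile_eq_filter_of_mono (Lord_pairwise_a l), List.mem_filter]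
  simp [pLt]

theorem mem_D_iff (l : List (Int × Int)) (t_f : Int) (x : Int × Int × Int) :
    x ∈ (Lord l).dropWhile (pLt t_f) ↔ x ∈ Lord l ∧ t_f ≤ x.1 := by
  rw [dropWhile_eq_filter_of_mono (Lord_pairwise_a l), List.mem_filter]
  simp [pLt, not_lt]

theorem overlap_bridge (l : List (Int × Int)) (t_i t_f : Int) :
    any_overlap t_i t_f l
      = (match updFold ((Lord l).takeWhile (pLt t_f)) none with
         | some m => decide (t_i < m)
         | none => false) := by
  rw [any_overlap_eq]
  cases hW : updFold ((Lord l).takeWhile (pLt t_f)) none with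
  | none =>
    have hnil := (updFold_none_iff _).mp hW
    simp only []
    rw [List.any_eq_false]
    intro sz hsz
    obtain ⟨k, hk, hszk⟩ := List.mem_iff_getElem.mp hsz
    intro hcon
    simp only [Bool.and_eq_true, decide_eq_true_eq] at hcon
    have hx : (sz.1, (k : Int), sz.2) ∈ tripsOf l := by
      rw [mem_tripsOf]
      exact ⟨k, hk, by rw [hszk]⟩
    have : (sz.1, (k : Int), sz.2) ∈ (Lord l).takeWhile (pLt t_f) := by
      rw [mem_W_iff]
      exact ⟨(mem_Lord_iff l _).mpr hx, hcon.2⟩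
    rw [hnil] at this
    simp at this
  | some M =>
    obtain ⟨⟨x0, hx0W, hx0b⟩, hub⟩ := updFold_none_some _ M hW
    simp only []
    by_cases hM : t_i < M
    · rw [decide_eq_true hM, List.any_eq_true]
      obtain ⟨hx0L, hx0f⟩ := (mem_W_iff l t_f x0).mp hx0W
      obtain ⟨k, hk, hxe⟩ := (mem_tripsOf l x0).mp ((mem_Lord_iff l x0).mp hx0L)
      refine ⟨l[k], List.getElem_mem hk, ?_⟩
      have h1 : l[k].1 = x0.1 := by rw [hxe]
      have h2 : l[k].2 = x0.2.2 := by rw [hxe]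
      simp only [Bool.and_eq_true, decide_eq_true_eq, h1, h2]
      exact ⟨by omega, hx0f⟩
    · rw [decide_eq_false hM, List.any_eq_false]
      intro sz hsz
      obtain ⟨k, hk, hszk⟩ := List.mem_iff_getElem.mp hsz
      intro hcon
      simp only [Bool.and_eq_true, decide_eq_true_eq] at hcon
      have hx : (sz.1, (k : Int), sz.2) ∈ (Lord l).takeWhile (pLt t_f) := by
        rw [mem_W_iff, mem_Lord_iff, mem_tripsOf]
        exact ⟨⟨k, hk, by rw [hszk]⟩, hcon.2⟩
      have := hub _ hx
      simp only at this
      omega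

-- A's candidate list
def candA (l : List (Int × Int)) (t_f : Int) : List (Int × Int) :=
  (PySem.List.enumerate l).filterMap
    (fun p => if t_f ≤ p.2.1 then some (p.2.1 - t_f, p.1) else none)

theorem mem_candA (l : List (Int × Int)) (t_f : Int) (y : Int × Int) :
    y ∈ candA l t_f ↔ ∃ x ∈ tripsOf l, t_f ≤ x.1 ∧ y = (x.1 - t_f, x.2.1) := by
  rw [candA, List.mem_filterMap]
  constructor
  · rintro ⟨p, hp, hf⟩
    by_cases hc : t_f ≤ p.2.1
    · rw [if_pos hc] at hf
      refine ⟨(p.2.1, p.1, p.2.2), List.mem_map.mpr ⟨p, hp, rfl⟩, hc, by injection hf with h; rw [← h]⟩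
    · rw [if_neg hc] at hf; cases hf
  · rintro ⟨x, hx, hc, rfl⟩
    obtain ⟨p, hp, rfl⟩ := List.mem_map.mp hx
    exact ⟨p, hp, by rw [if_pos hc]⟩

def minStep (acc : Option (Int × Int)) (x : Int × Int) : Option (Int × Int) :=
  match acc with
  | none => some x
  | some m =>
    if (decide (x.1 < m.1) || !decide (m.1 < x.1) && decide (x.2 < m.2)) = true
    then some x else some m

theorem minStep_none (x : Int × Int) : minStep none x = some x := rfl

theorem minStep_some (m x : Int × Int) :
    minStep (some m) x =
      if (decide (x.1 < m.1) || !decide (m.1 < x.1) && decide (x.2 < m.2)) = true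
      then some x else some m := rfl

theorem minStep_keeps_min (x q : Int × Int)
    (hx : x = q ∨ q.1 < x.1 ∨ (q.1 = x.1 ∧ q.2 < x.2)) : minStep (some q) x = some q := by
  have hcond : ¬ ((decide (x.1 < q.1) || !decide (q.1 < x.1) && decide (x.2 < q.2)) = true) := by
    rcases hx with rfl | h | ⟨h1, h2⟩ <;> simp <;> omega
  rw [minStep_some, if_neg hcond]

theorem minStep_takes_min (m q : Int × Int)
    (hm : m = q ∨ q.1 < m.1 ∨ (q.1 = m.1 ∧ q.2 < m.2)) : minStep (some m) q = some q := by
  rcases hm with rfl | h | ⟨h1, h2⟩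
  · rw [minStep_some]; split_ifs <;> rfl
  · rw [minStep_some, if_pos (by simp; omega)]
  · rw [minStep_some, if_pos (by simp; omega)]

theorem foldl_minStep_eq (ys : List (Int × Int)) (q : Int × Int) :
    ∀ (acc : Option (Int × Int)),
    (q ∈ ys ∨ acc = some q) →
    (∀ y ∈ ys, y ≠ q → q.1 < y.1 ∨ (q.1 = y.1 ∧ q.2 < y.2)) →
    (∀ m, acc = some m → m = q ∨ q.1 < m.1 ∨ (q.1 = m.1 ∧ q.2 < m.2)) →
    ys.foldl minStep acc = some q := by
  induction ys with
  | nil =>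
    intro acc hin _ _
    rcases hin with h | h
    · cases h
    · simpa using h
  | cons x ys ih =>
    intro acc hin hmin' hacc
    simp only [List.foldl_cons]
    have key : x = q ∨ q.1 < x.1 ∨ (q.1 = x.1 ∧ q.2 < x.2) := by
      by_cases hxq : x = q
      · exact Or.inl hxq
      · exact Or.inr (hmin' x (by simp) hxq)
    have hacc'1 : ∀ m, minStep acc x = some m → m = q ∨ q.1 < m.1 ∨ (q.1 = m.1 ∧ q.2 < m.2) := by
      intro m hm
      cases hacc0 : acc with
      | none =>
        rw [hacc0, minStep_none] at hm
        injection hm with hm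
        rw [← hm]
        exact key
      | some m0 =>
        rw [hacc0, minStep_some] at hm
        split_ifs at hm <;> injection hm with hm <;> rw [← hm]
        · exact key
        · exact hacc _ hacc0
    have hin' : q ∈ ys ∨ minStep acc x = some q := by
      rcases hin with h | h
      · rcases List.mem_cons.mp h with hqx | h2
        · right
          cases hacc0 : acc with
          | none => rw [minStep_none, hqx]
          | some m0 =>
            rw [← hqx]
            exact minStep_takes_min m0 q (hacc m0 hacc0)
        · exact Or.inl h2
      · right
        rw [h]
        exact minStep_keeps_min x q key
    exact ih (minStep acc x) hin' (fun y hy hne => hmin' y (by simp [hy]) hne) hacc'1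

theorem min2?_eq_of_unique_min (xs : List (Int × Int)) (q : Int × Int) (hq : q ∈ xs)
    (hmin : ∀ y ∈ xs, y ≠ q → q.1 < y.1 ∨ (q.1 = y.1 ∧ q.2 < y.2)) :
    PySem.List.min2? xs (fun v => v.1) (fun v => v.2) = some q := by
  have h : PySem.List.min2? xs (fun v => v.1) (fun v => v.2) = xs.foldl minStep none := by
    rw [PySem.List.min2?]
    exact PySem.List.foldl_congr_mem xs _ minStep none (fun acc x _ => by cases acc <;> rfl)
  rw [h]
  exact foldl_minStep_eq xs q none (Or.inl hq) hmin (fun m hm => by cases hm)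

theorem cand_nil (l : List (Int × Int)) (t_f : Int)
    (hD : (Lord l).dropWhile (pLt t_f) = []) : candA l t_f = [] := by
  rw [List.eq_nil_iff_forall_not_mem]
  intro y hy
  obtain ⟨x, hx, hc, rfl⟩ := (mem_candA l t_f y).mp hy
  have : x ∈ (Lord l).dropWhile (pLt t_f) :=
    (mem_D_iff _ _ _).mpr ⟨(mem_Lord_iff l x).mpr hx, hc⟩
  rw [hD] at this
  cases this

theorem cand_min (l : List (Int × Int)) (t_f : Int) (h : Int × Int × Int)
    (tl : List (Int × Int × Int)) (hD : (Lord l).dropWhile (pLt t_f) = h :: tl) :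
    PySem.List.min2? (candA l t_f) (fun v => v.1) (fun v => v.2) = some (h.1 - t_f, h.2.1) := by
  have hhD : h ∈ (Lord l).dropWhile (pLt t_f) := by rw [hD]; simp
  have hhL := (mem_D_iff l t_f h).mp hhD
  apply min2?_eq_of_unique_min
  · exact (mem_candA _ _ _).mpr ⟨h, (mem_Lord_iff l h).mp hhL.1, hhL.2, rfl⟩
  · intro y hy hne
    obtain ⟨x, hx, hc, rfl⟩ := (mem_candA l t_f y).mp hy
    have hxD : x ∈ h :: tl := by
      rw [← hD]
      exact (mem_D_iff _ _ _).mpr ⟨(mem_Lord_iff l x).mpr hx, hc⟩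
    rcases List.mem_cons.mp hxD with rfl | hxtl
    · exact absurd rfl hne
    · have hpw : ((Lord l).dropWhile (pLt t_f)).Pairwise (fun a b => lexK a < lexK b) :=
        (Lord_pairwise_lt l).sublist (List.dropWhile_sublist _)
      rw [hD] at hpw
      have hlt := List.rel_of_pairwise_cons hpw hxtl
      rw [lexK_lt_iff] at hlt
      change h.1 - t_f < x.1 - t_f ∨ (h.1 - t_f = x.1 - t_f ∧ h.2.1 < x.2.1)
      omega

theorem length_appendAtI (ys : List (List Int)) (i : Int) (x : Int) :
    (appendAtI ys i x).length = ys.length := by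
  simp [appendAtI, PySem.List.length_pySetD]

theorem appendAtI_neg_one (ys : List (List Int)) (x : Int) (h : ys ≠ []) :
    appendAtI ys (-1) x = appendAtI ys ((ys.length - 1 : Nat) : Int) x := by
  have hlen : 0 < ys.length := List.length_pos_iff.mpr h
  simp only [appendAtI, PySem.List.pySetD, PySem.List.pySet?, PySem.List.pyGetD,
    PySem.List.pyGet?, PySem.List.pyIdx?]
  have h1 : ¬ (0:Int) ≤ -1 := by omega
  have h2 : -(ys.length:Int) ≤ -1 := by omega
  have h3 : (0:Int) ≤ ((ys.length - 1 : Nat) : Int) := by omega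
  have h4 : ((ys.length - 1 : Nat) : Int) < (ys.length:Int) := by omega
  simp only [h1, if_false, h2, if_true, h3, h4]
  congr 1

theorem W_D_len (l : List (Int × Int)) (t_f : Int) :
    ((Lord l).takeWhile (pLt t_f)).length + ((Lord l).dropWhile (pLt t_f)).length
      = l.length := by
  rw [← Lord_length l]
  conv_rhs => rw [← List.takeWhile_append_dropWhile (p := pLt t_f) (l := Lord l)]
  rw [List.length_append]

theorem Lord_getAt_head (l : List (Int × Int)) (t_f : Int) (h : Int × Int × Int)
    (tl : List (Int × Int × Int)) (hD : (Lord l).dropWhile (pLt t_f) = h :: tl) :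
    PySem.List.pyGetD (Lord l) ((((Lord l).takeWhile (pLt t_f)).length : Nat) : Int) (0, 0, 0)
      = h := by
  have hsplit : Lord l = (Lord l).takeWhile (pLt t_f) ++ (h :: tl) := by
    rw [← hD, List.takeWhile_append_dropWhile]
  rw [PySem.List.pyGetD_natCast]
  have hlt : ((Lord l).takeWhile (pLt t_f)).length < (Lord l).length := by
    conv_rhs => rw [hsplit]
    simp
  rw [List.getD_eq_getElem _ _ hlt]
  have := List.getElem_append_right (as := (Lord l).takeWhile (pLt t_f)) (bs := h :: tl)
    (i := ((Lord l).takeWhile (pLt t_f)).length) (h₁ := le_refl _)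
    (h₂ := by rw [← hsplit]; exact hlt)
  rw [List.getElem_of_eq hsplit hlt, this]
  simp

-- the per-segment step: A's update of Y equals B's update of dur, and B's sweep invariant advances
theorem seg_step (l : List (Int × Int)) (et seg : Int) (ind Y : List (List Int))
    (k : Nat) (me : Option Int)
    (hY : Y.length = l.length + 1)
    (hI : InvB l (SECONDS_PER_SEGMENT * seg) k me) :
    (sspStep l et l.length (ind, Y) seg).2
      = (altSegStep (Lord l) l.length et (Y, k, me) seg).1
    ∧ (altSegStep (Lord l) l.length et (Y, k, me) seg).1.length = l.length + 1
    ∧ InvB l (SECONDS_PER_SEGMENT * (seg + 1))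
        (altSegStep (Lord l) l.length et (Y, k, me) seg).2.1
        (altSegStep (Lord l) l.length et (Y, k, me) seg).2.2 := by
  have hS : SECONDS_PER_SEGMENT = 5 := rfl
  have e0 : SECONDS_PER_SEGMENT * (seg + 0) = SECONDS_PER_SEGMENT * seg := by ring
  have e1 : SECONDS_PER_SEGMENT * (seg + 1) = SECONDS_PER_SEGMENT * seg + SECONDS_PER_SEGMENT := by
    ring
  obtain ⟨hsw, hI'⟩ := sweep_inv l (SECONDS_PER_SEGMENT * seg)
    (SECONDS_PER_SEGMENT * seg + SECONDS_PER_SEGMENT) k me hI (by omega)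
  simp only [sspStep, altSegStep, e0, e1, hsw]
  rw [overlap_bridge l (SECONDS_PER_SEGMENT * seg) (SECONDS_PER_SEGMENT * seg + SECONDS_PER_SEGMENT)]
  set t_f := SECONDS_PER_SEGMENT * seg + SECONDS_PER_SEGMENT with ht_f
  set me' := updFold ((Lord l).takeWhile (pLt t_f)) none with hme'
  set k' := ((Lord l).takeWhile (pLt t_f)).length with hk'
  split_ifs with hov hkeq
  · exact ⟨rfl, hY, hI'⟩
  · -- k' == n : censored segment
    have hwd := W_D_len l t_f
    rw [← hk'] at hwd
    have hkn : k' = l.length := by simpa using hkeq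
    have hD : (Lord l).dropWhile (pLt t_f) = [] := by
      apply List.eq_nil_of_length_eq_zero
      omega
    have hm : PySem.List.min2? ((PySem.List.enumerate l).filterMap
        (fun p => if t_f ≤ p.2.1 then some (p.2.1 - t_f, p.1) else none))
        (fun q => q.1) (fun q => q.2) = none := by
      have hc := cand_nil l t_f hD
      rw [candA] at hc
      rw [hc]
      rfl
    rw [hm]
    refine ⟨?_, by rw [length_appendAtI]; exact hY, hI'⟩
    show appendAtI Y (-1) (et - t_f) = appendAtI Y ((l.length : Nat) : Int) (et - t_f)
    rw [appendAtI_neg_one Y _ (by intro hc; rw [hc] at hY; simp at hY)]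
    have hYl : Y.length - 1 = l.length := by omega
    rw [hYl]
  · -- k' < n : next seizure is order[k']
    have hwd := W_D_len l t_f
    rw [← hk'] at hwd
    have hkn : k' ≠ l.length := by
      intro hc
      rw [hc] at hkeq
      simp at hkeq
    cases hD : (Lord l).dropWhile (pLt t_f) with
    | nil =>
      exfalso
      rw [hD] at hwd
      simp at hwd
      exact hkn hwd
    | cons h tl =>
      have hm : PySem.List.min2? ((PySem.List.enumerate l).filterMap
          (fun p => if t_f ≤ p.2.1 then some (p.2.1 - t_f, p.1) else none))
          (fun q => q.1) (fun q => q.2) = some (h.1 - t_f, h.2.1) := by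
        have hc := cand_min l t_f h tl hD
        rw [candA] at hc
        exact hc
      rw [hm]
      refine ⟨?_, by rw [length_appendAtI]; exact hY, hI'⟩
      show appendAtI Y h.2.1 (h.1 - t_f)
        = appendAtI Y (PySem.List.pyGetD (Lord l) (k' : Int) (0, 0, 0)).2.1
            ((PySem.List.pyGetD (Lord l) (k' : Int) (0, 0, 0)).1 - t_f)
      rw [hk', Lord_getAt_head l t_f h tl hD]

theorem fold_eq_upto (l : List (Int × Int)) (et : Int) (ind Y0 : List (List Int))
    (hY0 : Y0.length = l.length + 1) (m : Nat) :
    ((PySem.List.pyRange 0 (m : Int) 1).foldl (sspStep l et l.length) (ind, Y0)).2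
      = ((PySem.List.pyRange 0 (m : Int) 1).foldl (altSegStep (Lord l) l.length et)
          (Y0, 0, (none : Option Int))).1
    ∧ ((PySem.List.pyRange 0 (m : Int) 1).foldl (altSegStep (Lord l) l.length et)
          (Y0, 0, (none : Option Int))).1.length = l.length + 1
    ∧ InvB l (SECONDS_PER_SEGMENT * (m : Int))
        ((PySem.List.pyRange 0 (m : Int) 1).foldl (altSegStep (Lord l) l.length et)
          (Y0, 0, (none : Option Int))).2.1
        ((PySem.List.pyRange 0 (m : Int) 1).foldl (altSegStep (Lord l) l.length et)
          (Y0, 0, (none : Option Int))).2.2 := by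
  induction m with
  | zero =>
    have h0 : PySem.List.pyRange 0 ((0 : Nat) : Int) 1 = [] := rfl
    rw [h0]
    refine ⟨rfl, hY0, ?_⟩
    unfold InvB
    exact ⟨Nat.zero_le _, by simp, rfl⟩
  | succ m ih =>
    obtain ⟨h1, h2, h3⟩ := ih
    have hcast : ((m + 1 : Nat) : Int) = (m : Int) + 1 := by push_cast; ring
    rw [hcast, PySem.List.pyRange_one_succ_right (Int.natCast_nonneg m)]
    simp only [List.foldl_append, List.foldl_cons, List.foldl_nil]
    set SA := (PySem.List.pyRange 0 (m : Int) 1).foldl (sspStep l et l.length) (ind, Y0) with hSA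
    set SB := (PySem.List.pyRange 0 (m : Int) 1).foldl (altSegStep (Lord l) l.length et)
      (Y0, 0, (none : Option Int)) with hSB
    have eA : SA = (SA.1, SA.2) := rfl
    have eB : SB = (SA.2, SB.2.1, SB.2.2) := by rw [h1]
    have hstep := seg_step l et (m : Int) SA.1 SA.2 SB.2.1 SB.2.2
      (by rw [h1]; exact h2) h3
    rw [eA, eB]
    exact hstep

theorem block_eq (p : Int × List (Int × Int)) :
    (select_segments_part p.1 p.2).2
      = ((PySem.List.pyRange 0 p.1 1).foldl
          (altSegStep (Lord p.2) p.2.length (p.1 * SECONDS_PER_SEGMENT))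
          (List.replicate (p.2.length + 1) ([] : List Int), 0, (none : Option Int))).1
    ∧ ((PySem.List.pyRange 0 p.1 1).foldl
          (altSegStep (Lord p.2) p.2.length (p.1 * SECONDS_PER_SEGMENT))
          (List.replicate (p.2.length + 1) ([] : List Int), 0, (none : Option Int))).1.length
        = p.2.length + 1 := by
  rw [select_segments_part]
  by_cases hp : 0 < p.1
  · have hm : p.1 = ((p.1.toNat : Nat) : Int) := (Int.toNat_of_nonneg (le_of_lt hp)).symm
    rw [hm]
    have h := fold_eq_upto p.2 (((p.1.toNat : Nat) : Int) * SECONDS_PER_SEGMENT)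
      (List.replicate (p.2.length + 1) ([] : List Int))
      (List.replicate (p.2.length + 1) ([] : List Int)) (by simp) p.1.toNat
    exact ⟨h.1, h.2.1⟩
  · have hp' : p.1 ≤ 0 := by omega
    have hr : PySem.List.pyRange 0 p.1 1 = [] := by simp [PySem.List.pyRange, hp']
    rw [hr]
    exact ⟨rfl, by simp⟩

theorem rec_step_eq (acc : List (List Int) × List (List Bool)) (p : Int × List (Int × Int)) :
    csfStep acc p = altRecStep acc p := by
  have hL : PySem.List.sorted2 ((PySem.List.enumerate p.2).map (fun q => (q.2.1, q.1, q.2.2)))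
      (fun t => t.1) (fun t => t.2.1) = Lord p.2 := rfl
  obtain ⟨hdur, hlen⟩ := block_eq p
  simp only [csfStep, altRecStep, hL]
  rw [hdur]
  set dur := ((PySem.List.pyRange 0 p.1 1).foldl
    (altSegStep (Lord p.2) p.2.length (p.1 * SECONDS_PER_SEGMENT))
    (List.replicate (p.2.length + 1) ([] : List Int), 0, (none : Option Int))).1 with hd
  have hne : dur ≠ [] := by
    intro hc
    rw [hc] at hlen
    simp at hlen
  have hslB : PySem.List.slice dur none (some ((p.2.length : Nat) : Int)) = dur.dropLast := by
    rw [PySem.List.slice_to_natCast, List.dropLast_eq_take, hlen]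
    simp
  have hgB : PySem.List.pyGetD dur ((p.2.length : Nat) : Int) ([] : List Int)
      = dur.getLast hne := by
    rw [PySem.List.pyGetD_natCast, List.getD_eq_getElem _ _ (by omega),
      List.getLast_eq_getElem hne]
    congr 1
    omega
  have hgA : PySem.List.pyGetD dur (-1) ([] : List Int) = dur.getLast hne :=
    PySem.List.pyGetD_neg_one dur [] hne
  rw [PySem.List.slice_to_neg_one, hslB, hgA, hgB]
  rw [PySem.List.foldl_prod_mk (f := fun a s => a ++ [s])
    (g := fun a s => a ++ [PySem.List.pyRepeat [true] (PySem.List.len s)])]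
  rw [PySem.List.foldl_append_singleton_eq_self, PySem.List.foldl_append_singleton_eq_map]
  refine Prod.ext ?_ ?_
  · show acc.1 ++ dur.dropLast ++ [dur.getLast hne] = acc.1 ++ dur
    rw [List.append_assoc, List.dropLast_append_getLast hne]
  · rfl

-- ===== VERDICT (by name: the statement is the Claim_ definition above) =====
theorem convert_survival_form_spec : Claim_equal_convert_survival_form := by
  intro lengths annotations _
  unfold Spec_convert_survival_form convert_survival_form convert_survival_form_alt
  rw [funext fun acc => funext fun p => rec_step_eq acc p]
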